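-- pv_equiv track=rewrite | github.com/Dannyxiuzq/Data_Mining2023HW | HW1/code/test.py | get_txt_path
-- ===== SOURCE A (Python) =====
-- def get_txt_path(img_path):
--     i = 0
--     txt_path = ""
--     for s in img_path:
--         txt_path += s
--         if s == '/':
--             i += 1
--         if i == 3:
--             break
--     return txt_path
-- ===== SOURCE B (Python) =====
-- def get_txt_path(img_path):
--     idx = -1
--     for _ in range(3):
--         pos = img_path.find('/', idx + 1)
--         if pos == -1:
--             return img_path
--         idx = pos
--     return img_path[:idx + 1]
-- ===== Notes on version B (the rewrite author's own statement) =====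
-- stated objective: simpler
-- what changed: B locates the third slash with three str.find calls and returns one slice, instead of A's character-by-character Python loop that accumulates a string while counting slashes.
import Mathlib
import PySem

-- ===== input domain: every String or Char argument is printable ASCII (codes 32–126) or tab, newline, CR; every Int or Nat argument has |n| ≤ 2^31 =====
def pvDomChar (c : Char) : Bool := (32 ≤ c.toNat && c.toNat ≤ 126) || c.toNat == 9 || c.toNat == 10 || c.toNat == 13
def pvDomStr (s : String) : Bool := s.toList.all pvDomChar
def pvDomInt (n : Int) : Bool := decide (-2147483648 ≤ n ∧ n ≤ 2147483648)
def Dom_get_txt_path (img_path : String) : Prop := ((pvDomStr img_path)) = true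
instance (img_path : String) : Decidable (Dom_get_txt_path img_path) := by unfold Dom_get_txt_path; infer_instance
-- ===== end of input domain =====

-- B replaces A's per-character accumulating loop by three find-then-slice steps (simpler decomposition, same cost).

-- ===== PORT A =====
-- A's loop: append each char to the accumulator, count '/', break when the count reaches 3.
def getTxtLoop : Nat → List Char → List Char → List Char
  | _, acc, [] => acc
  | i, acc, c :: rest =>
    let acc' := acc ++ [c]
    let i' := if c = '/' then i + 1 else i
    if i' = 3 then acc' else getTxtLoop i' acc' rest

def get_txt_path (img_path : String) : String :=
  String.ofList (getTxtLoop 0 [] img_path.toList)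

-- ===== PORT B =====
-- hand port of Python's str.find('/', start): index of the first '/' in the given suffix — exact on this use.
def findSl : List Char → Option Nat
  | [] => none
  | c :: rest => if c = '/' then some 0 else (findSl rest).map (· + 1)

-- B: three find calls (each next search starts just past the previous slash), then one slice.
def get_txt_path_alt (img_path : String) : String :=
  match findSl img_path.toList with
  | none => img_path
  | some p1 =>
    match findSl (img_path.toList.drop (p1 + 1)) with
    | none => img_path
    | some p2 =>
      match findSl ((img_path.toList.drop (p1 + 1)).drop (p2 + 1)) with
      | none => img_path
      | some p3 => String.ofList (img_path.toList.take (p1 + 1 + (p2 + 1) + (p3 + 1)))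

-- ===== PRECONDITION & SPEC =====
def Spec_get_txt_path (img_path : String) (out : String) : Prop := out = get_txt_path_alt img_path
instance (img_path : String) (out : String) : Decidable (Spec_get_txt_path img_path out) := by unfold Spec_get_txt_path; infer_instance

-- ===== CLAIM (what is proved, stated in full; the proofs are below) =====
def Claim_equal_get_txt_path : Prop := ∀ (img_path : String), Dom_get_txt_path img_path → Spec_get_txt_path img_path (get_txt_path img_path)

-- ===== LEMMAS AND PROOFS =====

-- the common characterisation: prefix up to (and including) the k-th slash, or everything
def upToSl : Nat → List Char → List Char
  | _, [] => []
  | k, c :: rest => if c = '/' then (if k ≤ 1 then [c] else c :: upToSl (k - 1) rest) else c :: upToSl k rest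

theorem getTxtLoop_eq (cs : List Char) : ∀ (i : Nat) (acc : List Char), i < 3 →
    getTxtLoop i acc cs = acc ++ upToSl (3 - i) cs := by
  induction cs with
  | nil => intro i acc _; simp [getTxtLoop, upToSl]
  | cons c rest ih =>
    intro i acc hi
    by_cases hc : c = '/'
    · subst hc
      by_cases h3 : i + 1 = 3
      · have : i = 2 := by omega
        subst this
        simp [getTxtLoop, upToSl]
      · have hi' : i + 1 < 3 := by omega
        have hk : ¬ (3 - i ≤ 1) := by omega
        have hk2 : 3 - (i + 1) = 3 - i - 1 := by omega
        simp [getTxtLoop, h3, ih (i + 1) (acc ++ ['/']) hi', upToSl, hk, hk2]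
    · have h3 : i ≠ 3 := by omega
      simp [getTxtLoop, hc, h3, ih i (acc ++ [c]) hi, upToSl]

theorem upToSl_of_findSl_none (cs : List Char) (h : findSl cs = none) (k : Nat) :
    upToSl k cs = cs := by
  induction cs generalizing k with
  | nil => simp [upToSl]
  | cons c rest ih =>
    unfold findSl at h
    by_cases hc : c = '/'
    · simp [hc] at h
    · simp only [if_neg hc, Option.map_eq_none_iff] at h
      simp [upToSl, hc, ih h]

theorem upToSl_of_findSl_some (cs : List Char) : ∀ (p k : Nat), findSl cs = some p → 2 ≤ k →
    upToSl k cs = cs.take (p + 1) ++ upToSl (k - 1) (cs.drop (p + 1)) := by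
  induction cs with
  | nil => intro p k h _; simp [findSl] at h
  | cons c rest ih =>
    intro p k h hk
    unfold findSl at h
    by_cases hc : c = '/'
    · rw [if_pos hc] at h
      injection h with h
      subst h
      have h1 : ¬ k ≤ 1 := by omega
      simp [upToSl, hc, h1]
    · simp only [if_neg hc, Option.map_eq_some_iff] at h
      obtain ⟨q, hq, hpq⟩ := h
      subst hpq
      have := ih q k hq hk
      simp [upToSl, hc, this, List.take_succ_cons, List.drop_succ_cons]

theorem upToSl1_of_findSl_some (cs : List Char) : ∀ (p : Nat), findSl cs = some p →
    upToSl 1 cs = cs.take (p + 1) := by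
  induction cs with
  | nil => intro p h; simp [findSl] at h
  | cons c rest ih =>
    intro p h
    unfold findSl at h
    by_cases hc : c = '/'
    · rw [if_pos hc] at h
      injection h with h
      subst h
      simp [upToSl, hc]
    · simp only [if_neg hc, Option.map_eq_some_iff] at h
      obtain ⟨q, hq, hpq⟩ := h
      subst hpq
      simp [upToSl, hc, ih q hq, List.take_succ_cons]

theorem alt_eq_upToSl (s : String) : get_txt_path_alt s = String.ofList (upToSl 3 s.toList) := by
  unfold get_txt_path_alt
  cases h1 : findSl s.toList with
  | none =>
    rw [upToSl_of_findSl_none _ h1 3, String.ofList_toList]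
  | some p1 =>
    have e1 := upToSl_of_findSl_some s.toList p1 3 h1 (by omega)
    cases h2 : findSl (s.toList.drop (p1 + 1)) with
    | none =>
      have e2 := upToSl_of_findSl_none _ h2 2
      simp only [h2]
      rw [e1, show (3 : Nat) - 1 = 2 from rfl, e2, List.take_append_drop,
        String.ofList_toList]
    | some p2 =>
      have e2 := upToSl_of_findSl_some _ p2 2 h2 (by omega)
      cases h3 : findSl ((s.toList.drop (p1 + 1)).drop (p2 + 1)) with
      | none =>
        have e3 := upToSl_of_findSl_none _ h3 1
        simp only [h2, h3]
        rw [e1, show (3 : Nat) - 1 = 2 from rfl, e2, show (2 : Nat) - 1 = 1 from rfl, e3,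
          List.take_append_drop, List.take_append_drop, String.ofList_toList]
      | some p3 =>
        have e3 := upToSl1_of_findSl_some _ p3 h3
        simp only [h2, h3]
        rw [e1, show (3 : Nat) - 1 = 2 from rfl, e2, show (2 : Nat) - 1 = 1 from rfl, e3,
          show p1 + 1 + (p2 + 1) + (p3 + 1) = (p1 + 1) + ((p2 + 1) + (p3 + 1)) by omega,
          List.take_add (i := p1 + 1) (j := (p2 + 1) + (p3 + 1)),
          List.take_add (i := p2 + 1) (j := p3 + 1)]

-- ===== VERDICT (by name: the statement is the Claim_ definition above) =====
theorem get_txt_path_spec : Claim_equal_get_txt_path := by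
  intro s _
  unfold Spec_get_txt_path
  rw [alt_eq_upToSl]
  unfold get_txt_path
  rw [getTxtLoop_eq s.toList 0 [] (by omega)]
  rfl
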